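-- pv_equiv track=rewrite | github.com/shin-shin-01/algorithm | practice/2041/main.py | create
-- ===== SOURCE A (Python) =====
-- def create(block):
--     """
--     create new block (N^2 * N^2) from old block (N * N)
--     """
--     block_output = []
--     N = len(block)
--
--     for n_x in range(N):
--         for n_y in range(N):
--
--             b = block[n_y][n_x]
--             if b == '#':
--                 out = block
--             else:
--                 out = [list('.' * N)] * N
--
--             for o_idx in range(len(out)):
--                 idx = N * n_y + o_idx
--
--                 if len(block_output) < idx + 1:
--                     block_output.append([])
--
--                 block_output[idx].extend(out[o_idx])
--
--     return block_output
-- ===== SOURCE B (Python) =====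
-- def create(block):
--     """
--     create new block (N^2 * N^2) from old block (N * N)
--     """
--     N = len(block)
--     return [[block[r % N][c % N] if block[r // N][c // N] == '#' else '.'
--              for c in range(N * N)]
--             for r in range(N * N)]
-- ===== Notes on version B (the rewrite author's own statement) =====
-- stated objective: simpler
-- what changed: B computes every output cell directly by coordinate arithmetic (cell (r,c) = block[r%N][c%N] if block[r//N][c//N]=='#' else '.') in one comprehension, instead of A's interleaved column-by-column row-extension with conditional row creation.
-- outside the precondition, e.g. on create([['#', '.', 'x']]): A returns [['#', '.', 'x']], B returns [['#']]
import Mathlib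
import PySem

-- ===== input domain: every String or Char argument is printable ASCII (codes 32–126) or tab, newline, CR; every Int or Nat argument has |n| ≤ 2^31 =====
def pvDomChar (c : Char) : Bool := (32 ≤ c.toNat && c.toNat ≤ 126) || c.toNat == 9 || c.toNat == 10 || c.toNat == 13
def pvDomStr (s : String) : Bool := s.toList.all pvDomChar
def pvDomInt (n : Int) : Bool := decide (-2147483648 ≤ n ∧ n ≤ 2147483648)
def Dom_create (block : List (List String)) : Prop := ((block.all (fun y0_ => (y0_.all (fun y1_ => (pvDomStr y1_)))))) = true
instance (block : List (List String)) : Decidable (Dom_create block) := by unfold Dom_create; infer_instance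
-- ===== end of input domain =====

-- B computes each output cell directly from its coordinates instead of A's
-- interleaved row-extension loops (objective: simpler).
-- A mutates only its local accumulator, never the argument.

-- ===== PORT A =====
-- out = block  if block[n_y][n_x] == '#'  else [list('.'*N)]*N
def pvOut (block : List (List String)) (N n_x n_y : Nat) : List (List String) :=
  if (block.getD n_y []).getD n_x "" = "#" then block
  else List.replicate N (List.replicate N ".")

-- the body of A's innermost loop: conditional row creation, then extend row idx
def pvExt (block : List (List String)) (N n_x n_y : Nat)
    (acc : List (List String)) (o_idx : Nat) : List (List String) :=
  let out := pvOut block N n_x n_y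
  let idx := N * n_y + o_idx
  let acc2 := if acc.length < idx + 1 then acc ++ [[]] else acc
  acc2.set idx ((acc2.getD idx []) ++ (out.getD o_idx []))

def createInner (block : List (List String)) (N n_x n_y : Nat)
    (acc : List (List String)) : List (List String) :=
  (List.range (pvOut block N n_x n_y).length).foldl (pvExt block N n_x n_y) acc

def create (block : List (List String)) : List (List String) :=
  let N := block.length
  (List.range N).foldl (fun acc n_x =>
    (List.range N).foldl (fun acc n_y => createInner block N n_x n_y acc) acc) []

-- ===== PORT B =====
def create_alt (block : List (List String)) : List (List String) :=
  let N := block.length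
  (List.range (N * N)).map (fun r =>
    (List.range (N * N)).map (fun c =>
      if (block.getD (r / N) []).getD (c / N) "" = "#"
      then (block.getD (r % N) []).getD (c % N) "" else "."))

-- ===== PRECONDITION & SPEC =====
-- Pre_ restricts to square blocks (every row as long as the block), the N×N shape
-- the function is written for: on a row shorter than N, A raises IndexError; on a
-- row longer than N, A copies the extra trailing entries into the output, an
-- accident of extending by whole rows that B's per-cell formula has no reason to
-- reproduce.
def Pre_create (block : List (List String)) : Prop :=
  ∀ row ∈ block, row.length = block.length
instance (block : List (List String)) : Decidable (Pre_create block) := by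
  unfold Pre_create; infer_instance
def pvWitness_create : List (List String) := [["#", "."], [".", "#"]]

def Spec_create (block : List (List String)) (out : List (List String)) : Prop := out = create_alt block
instance (block : List (List String)) (out : List (List String)) : Decidable (Spec_create block out) := by unfold Spec_create; infer_instance

-- ===== CLAIM (what is proved, stated in full; the proofs are below) =====
def Claim_equal_create : Prop := ∀ (block : List (List String)), Dom_create block → Pre_create block → Spec_create block (create block)

-- ===== LEMMAS AND PROOFS =====

-- B's per-cell formula as a function
def pvCell (block : List (List String)) (N r c : Nat) : String :=
  if (block.getD (r / N) []).getD (c / N) "" = "#"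
  then (block.getD (r % N) []).getD (c % N) "" else "."

-- a prefix of output row r, width w
def pvRow (block : List (List String)) (N r w : Nat) : List String :=
  (List.range w).map (pvCell block N r)

theorem getD_self (l : List String) :
    (List.range l.length).map (fun j => l.getD j "") = l := by
  apply List.ext_getElem
  · simp
  · intro i h1 h2
    simp [List.getD_eq_getElem?_getD, List.getElem?_eq_getElem h2]

theorem pvCell_block (block : List (List String)) (N n_x n_y o_idx j : Nat)
    (hx : n_x < N) (_hy : n_y < N) (ho : o_idx < N) (hj : j < N) :
    pvCell block N (N * n_y + o_idx) (N * n_x + j)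
      = (if (block.getD n_y []).getD n_x "" = "#"
         then (block.getD o_idx []).getD j "" else ".") := by
  have hN : 0 < N := Nat.lt_of_le_of_lt (Nat.zero_le _) hx
  unfold pvCell
  rw [Nat.mul_add_div hN, Nat.mul_add_div hN, Nat.mul_add_mod, Nat.mul_add_mod,
    Nat.div_eq_of_lt ho, Nat.div_eq_of_lt hj, Nat.mod_eq_of_lt ho, Nat.mod_eq_of_lt hj,
    Nat.add_zero, Nat.add_zero]

-- the row A extends with equals the corresponding slice of B's cells
theorem pvOut_row (block : List (List String)) (N n_x n_y o_idx : Nat)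
    (hpre : Pre_create block) (hN : block.length = N)
    (hx : n_x < N) (hy : n_y < N) (ho : o_idx < N) :
    (pvOut block N n_x n_y).getD o_idx []
      = (List.range N).map (fun j => pvCell block N (N * n_y + o_idx) (N * n_x + j)) := by
  have hmap : ∀ j < N, pvCell block N (N * n_y + o_idx) (N * n_x + j)
      = (if (block.getD n_y []).getD n_x "" = "#"
         then (block.getD o_idx []).getD j "" else ".") := fun j hj =>
    pvCell_block block N n_x n_y o_idx j hx hy ho hj
  unfold pvOut
  split
  · next h =>
    have hoB : o_idx < block.length := hN ▸ ho
    have hrow : (block.getD o_idx []).length = N := by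
      rw [List.getD_eq_getElem?_getD, List.getElem?_eq_getElem hoB]
      exact (hN ▸ hpre _ (List.getElem_mem hoB))
    calc block.getD o_idx []
        = (List.range (block.getD o_idx []).length).map (fun j => (block.getD o_idx []).getD j "") :=
          (getD_self _).symm
      _ = (List.range N).map (fun j => (block.getD o_idx []).getD j "") := by rw [hrow]
      _ = _ := by
          apply List.map_congr_left
          intro j hj
          rw [hmap j (List.mem_range.mp hj), if_pos h]
  · next h =>
    have : (List.replicate N (List.replicate N ".")).getD o_idx [] = List.replicate N "." := by
      rw [List.getD_eq_getElem?_getD, List.getElem?_replicate_of_lt ho]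
      rfl
    rw [this]
    apply List.ext_getElem
    · simp
    · intro i h1 h2
      simp only [List.getElem_replicate, List.getElem_map, List.getElem_range]
      rw [hmap i (by simpa using h2), if_neg h]

-- first pass (n_x = 0): one innermost step appends a fresh full-width-N row
theorem pvExt_append (block : List (List String)) (N n_y o_idx : Nat)
    (hpre : Pre_create block) (hN : block.length = N)
    (hy : n_y < N) (ho : o_idx < N) :
    pvExt block N 0 n_y
        ((List.range (N * n_y + o_idx)).map (fun r => pvRow block N r N)) o_idx
      = (List.range (N * n_y + o_idx + 1)).map (fun r => pvRow block N r N) := by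
  have hNpos : 0 < N := by omega
  have hlen : ((List.range (N * n_y + o_idx)).map (fun r => pvRow block N r N)).length
      = N * n_y + o_idx := by simp
  have hout : (pvOut block N 0 n_y).getD o_idx [] = pvRow block N (N * n_y + o_idx) N := by
    rw [pvOut_row block N 0 n_y o_idx hpre hN hNpos hy ho]
    unfold pvRow
    apply List.map_congr_left
    intro j _
    simp
  unfold pvExt
  dsimp only
  rw [if_pos (by omega), hout]
  have hget : (((List.range (N * n_y + o_idx)).map (fun r => pvRow block N r N)) ++ [[]]).getD
      (N * n_y + o_idx) [] = ([] : List String) := by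
    rw [List.getD_eq_getElem?_getD, List.getElem?_append_right (by omega)]
    simp [hlen]
  rw [hget, List.nil_append]
  apply List.ext_getElem
  · simp [hlen]
  · intro i h1 h2
    rcases Nat.lt_or_ge i (N * n_y + o_idx) with hi | hi
    · rw [List.getElem_set_ne (by omega)]
      rw [List.getElem_append_left (by simpa [hlen] using hi)]
      simp
    · have hieq : i = N * n_y + o_idx := by simp at h2; omega
      subst hieq
      rw [List.getElem_set_self (by simp [hlen])]
      simp

-- later passes: one innermost step extends row idx in place by N cells
theorem pvExt_set (block : List (List String)) (N n_x n_y o_idx : Nat)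
    (hpre : Pre_create block) (hN : block.length = N)
    (hx : n_x < N) (hy : n_y < N) (ho : o_idx < N) :
    pvExt block N n_x n_y
        ((List.range (N * N)).map (fun r =>
          pvRow block N r (if r < N * n_y + o_idx then N * n_x + N else N * n_x))) o_idx
      = (List.range (N * N)).map (fun r =>
          pvRow block N r (if r < N * n_y + o_idx + 1 then N * n_x + N else N * n_x)) := by
  have hidxlt : N * n_y + o_idx < N * N := by
    have h1 : n_y + 1 ≤ N := hy
    have h2 : N * (n_y + 1) ≤ N * N := Nat.mul_le_mul_left N h1
    simp [Nat.mul_add] at h2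
    omega
  have hlen : ((List.range (N * N)).map (fun r =>
      pvRow block N r (if r < N * n_y + o_idx then N * n_x + N else N * n_x))).length
      = N * N := by simp
  have hget : ((List.range (N * N)).map (fun r =>
      pvRow block N r (if r < N * n_y + o_idx then N * n_x + N else N * n_x))).getD
      (N * n_y + o_idx) [] = pvRow block N (N * n_y + o_idx) (N * n_x) := by
    rw [List.getD_eq_getElem?_getD, List.getElem?_map, List.getElem?_range hidxlt]
    simp
  have hout : (pvOut block N n_x n_y).getD o_idx []
      = (List.range N).map (fun j => pvCell block N (N * n_y + o_idx) (N * n_x + j)) :=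
    pvOut_row block N n_x n_y o_idx hpre hN hx hy ho
  have hextend : pvRow block N (N * n_y + o_idx) (N * n_x)
        ++ (List.range N).map (fun j => pvCell block N (N * n_y + o_idx) (N * n_x + j))
      = pvRow block N (N * n_y + o_idx) (N * n_x + N) := by
    unfold pvRow
    rw [List.range_add, List.map_append, List.map_map]
    rfl
  unfold pvExt
  dsimp only
  rw [if_neg (by omega), hget, hout, hextend]
  apply List.ext_getElem
  · simp [hlen]
  · intro i h1 h2
    have hi2 : i < N * N := by simpa using h2
    rcases eq_or_ne i (N * n_y + o_idx) with hieq | hne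
    · subst hieq
      rw [List.getElem_set_self (by simpa using hidxlt)]
      simp only [List.getElem_map, List.getElem_range]
      rw [if_pos (Nat.lt_succ_self _)]
    · rw [List.getElem_set_ne (Ne.symm hne)]
      simp only [List.getElem_map, List.getElem_range]
      congr 1
      split_ifs <;> omega

-- innermost fold, first pass: t steps append t rows
theorem inner_fold_first (block : List (List String)) (N n_y : Nat)
    (hpre : Pre_create block) (hN : block.length = N) (hy : n_y < N) :
    ∀ t, t ≤ N →
    (List.range t).foldl (pvExt block N 0 n_y)
        ((List.range (N * n_y)).map (fun r => pvRow block N r N))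
      = (List.range (N * n_y + t)).map (fun r => pvRow block N r N) := by
  intro t
  induction t with
  | zero => intro _; rfl
  | succ t ih =>
    intro ht
    rw [List.range_succ, List.foldl_append, ih (by omega)]
    simpa [Nat.add_assoc] using
      pvExt_append block N n_y t hpre hN hy (by omega)
  
-- innermost fold, later passes: t steps widen t rows
theorem inner_fold_later (block : List (List String)) (N n_x n_y : Nat)
    (hpre : Pre_create block) (hN : block.length = N) (hx : n_x < N) (hy : n_y < N) :
    ∀ t, t ≤ N →
    (List.range t).foldl (pvExt block N n_x n_y)
        ((List.range (N * N)).map (fun r =>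
          pvRow block N r (if r < N * n_y then N * n_x + N else N * n_x)))
      = (List.range (N * N)).map (fun r =>
          pvRow block N r (if r < N * n_y + t then N * n_x + N else N * n_x)) := by
  intro t
  induction t with
  | zero => intro _; simp
  | succ t ih =>
    intro ht
    rw [List.range_succ, List.foldl_append, ih (by omega)]
    simpa [Nat.add_assoc] using
      pvExt_set block N n_x n_y t hpre hN hx hy (by omega)

theorem pvOut_length (block : List (List String)) (N n_x n_y : Nat)
    (hN : block.length = N) : (pvOut block N n_x n_y).length = N := by
  unfold pvOut; split <;> simp [hN]

-- middle fold, first outer pass (n_x = 0)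
theorem middle_fold_first (block : List (List String)) (N : Nat)
    (hpre : Pre_create block) (hN : block.length = N) :
    ∀ s, s ≤ N →
    (List.range s).foldl (fun acc n_y => createInner block N 0 n_y acc) []
      = (List.range (N * s)).map (fun r => pvRow block N r N) := by
  intro s
  induction s with
  | zero => intro _; simp
  | succ s ih =>
    intro hs
    rw [List.range_succ, List.foldl_append, ih (by omega)]
    simp only [List.foldl_cons, List.foldl_nil]
    unfold createInner
    rw [pvOut_length block N 0 s hN,
      inner_fold_first block N s hpre hN (by omega) N (le_refl N),
      Nat.mul_succ]

-- middle fold, later outer passes (n_x ≥ 1): all N² rows widen from N·n_x to N·n_x+N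
theorem middle_fold_later (block : List (List String)) (N n_x : Nat)
    (hpre : Pre_create block) (hN : block.length = N) (hx : n_x < N) :
    ∀ s, s ≤ N →
    (List.range s).foldl (fun acc n_y => createInner block N n_x n_y acc)
        ((List.range (N * N)).map (fun r => pvRow block N r (N * n_x)))
      = (List.range (N * N)).map (fun r =>
          pvRow block N r (if r < N * s then N * n_x + N else N * n_x)) := by
  intro s
  induction s with
  | zero => intro _; simp
  | succ s ih =>
    intro hs
    rw [List.range_succ, List.foldl_append, ih (by omega)]
    simp only [List.foldl_cons, List.foldl_nil]
    unfold createInner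
    rw [pvOut_length block N n_x s hN]
    have hm : N * (s + 1) = N * s + N := by ring
    rw [inner_fold_later block N n_x s hpre hN hx (by omega) N (le_refl N), hm]

-- outer fold: after k passes every row has width N·k
theorem outer_fold (block : List (List String)) (N : Nat)
    (hpre : Pre_create block) (hN : block.length = N) :
    ∀ k, k ≤ N →
    (List.range k).foldl (fun acc n_x =>
        (List.range N).foldl (fun acc n_y => createInner block N n_x n_y acc) acc) []
      = (if k = 0 then [] else (List.range (N * N)).map (fun r => pvRow block N r (N * k))) := by
  intro k
  induction k with
  | zero => intro _; simp
  | succ k ih =>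
    intro hk
    rw [List.range_succ, List.foldl_append, ih (by omega)]
    simp only [List.foldl_cons, List.foldl_nil]
    rcases Nat.eq_zero_or_pos k with rfl | hkpos
    · rw [if_pos rfl, if_neg (by omega)]
      rw [middle_fold_first block N hpre hN N (le_refl N)]
      simp
    · rw [if_neg (by omega), if_neg (by omega)]
      have hm : N * (k + 1) = N * k + N := by ring
      rw [middle_fold_later block N k hpre hN (by omega) N (le_refl N), hm]
      apply List.map_congr_left
      intro r hr
      rw [if_pos (by simpa using hr)]

-- ===== VERDICT (by name: the statement is the Claim_ definition above) =====
theorem create_spec : Claim_equal_create := by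
  intro block _ hpre
  unfold Spec_create create create_alt
  simp only []
  rw [outer_fold block block.length hpre rfl block.length (le_refl _)]
  rcases Nat.eq_zero_or_pos block.length with h0 | hpos
  · simp [h0]
  · rw [if_neg (by omega)]
    apply List.map_congr_left
    intro r _
    rfl
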